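-- pv_equiv track=rewrite | github.com/GeorgianBadita/advent-of-code-2020 | day16/day16-part2.py | get_good_tickets
-- ===== SOURCE A (Python) =====
-- from typing import Dict, List, Tuple
--
-- def number_in_at_least_one_range(number: int, ranges: Dict[str, List[int]]) -> bool:
--     for value in ranges.values():
--         for a, b in value:
--             if a <= number <= b:
--                 return True
--     return False
--
-- def get_good_tickets(tickets: List[List[int]], ranges: Dict[str, List[tuple]]):
--     good_tickets = []
--     for ticket in tickets:
--         should_discard = False
--         for ticket_value in ticket:
--             if not number_in_at_least_one_range(ticket_value, ranges):
--                 should_discard = True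
--                 break
--         if not should_discard:
--             good_tickets.append(ticket)
--     return good_tickets
-- ===== SOURCE B (Python) =====
-- def _merge(ivs):
--     # ivs sorted by start; produce disjoint intervals covering the same integers
--     merged = []
--     cur = None
--     for a, b in ivs:
--         if cur is None:
--             cur = (a, b)
--         elif a <= cur[1]:
--             if b > cur[1]:
--                 cur = (cur[0], b)
--         else:
--             merged.append(cur)
--             cur = (a, b)
--     if cur is not None:
--         merged.append(cur)
--     return merged
--
--
-- def _covered(merged, x):
--     # rightmost interval whose start is <= x (hand-rolled bisect_right)
--     lo, hi = 0, len(merged)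
--     while lo < hi:
--         mid = (lo + hi) // 2
--         if merged[mid][0] <= x:
--             lo = mid + 1
--         else:
--             hi = mid
--     return lo > 0 and x <= merged[lo - 1][1]
--
--
-- def get_good_tickets(tickets, ranges):
--     ivs = sorted((iv for vals in ranges.values() for iv in vals),
--                  key=lambda iv: iv[0])
--     merged = _merge(ivs)
--     return [t for t in tickets if all(_covered(merged, x) for x in t)]
-- ===== Notes on version B (the rewrite author's own statement) =====
-- stated objective: faster
-- what changed: Instead of scanning every range for every ticket value, B flattens the ranges once, sorts them by start, merges them into disjoint intervals, and checks each value with a binary search over the merged intervals.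
import Mathlib
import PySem

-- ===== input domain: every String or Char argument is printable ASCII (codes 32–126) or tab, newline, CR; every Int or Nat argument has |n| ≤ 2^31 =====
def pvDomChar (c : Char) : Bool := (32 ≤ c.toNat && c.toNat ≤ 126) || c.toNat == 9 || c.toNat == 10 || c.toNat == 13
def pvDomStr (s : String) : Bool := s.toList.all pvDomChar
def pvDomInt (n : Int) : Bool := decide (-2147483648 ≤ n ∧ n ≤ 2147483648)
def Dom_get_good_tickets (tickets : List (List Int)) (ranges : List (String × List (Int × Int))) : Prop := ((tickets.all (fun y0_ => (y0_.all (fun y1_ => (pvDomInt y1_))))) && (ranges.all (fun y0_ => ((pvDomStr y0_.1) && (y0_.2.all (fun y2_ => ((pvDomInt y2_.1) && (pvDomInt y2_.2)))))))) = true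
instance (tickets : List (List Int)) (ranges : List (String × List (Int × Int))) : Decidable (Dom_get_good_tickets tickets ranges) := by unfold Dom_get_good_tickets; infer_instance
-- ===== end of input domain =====

-- B sorts the flattened ranges once, merges them into disjoint intervals and binary-searches
-- each ticket value, instead of A's scan of every range for every value.

-- ===== PORT A =====
-- inner 'for a, b in value' loop of number_in_at_least_one_range (early return True)
def pvInnerA (number : Int) : List (Int × Int) → Bool
  | [] => false
  | (a, b) :: rest => if a ≤ number ∧ number ≤ b then true else pvInnerA number rest

-- outer 'for value in ranges.values()' loop (return True escapes both loops)
def pvNumInRangesA (number : Int) : List (List (Int × Int)) → Bool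
  | [] => false
  | v :: rest => if pvInnerA number v then true else pvNumInRangesA number rest

-- 'for ticket_value in ticket: … should_discard = True; break'
def pvDiscardA (vals : List (List (Int × Int))) : List Int → Bool
  | [] => false
  | x :: rest => if !pvNumInRangesA x vals then true else pvDiscardA vals rest

def get_good_tickets (tickets : List (List Int)) (ranges : List (String × List (Int × Int))) : List (List Int) :=
  let vals := (PySem.Dict.ofList ranges).values
  tickets.foldl (fun good_tickets ticket =>
    if !pvDiscardA vals ticket then good_tickets ++ [ticket] else good_tickets) []

-- ===== PORT B =====
-- _merge's loop state: (merged so far, current open interval)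
def pvMergeStep (st : List (Int × Int) × Option (Int × Int)) (iv : Int × Int) :
    List (Int × Int) × Option (Int × Int) :=
  match st.2 with
  | none => (st.1, some iv)
  | some c =>
    if iv.1 ≤ c.2 then
      if iv.2 > c.2 then (st.1, some (c.1, iv.2)) else (st.1, some c)
    else (st.1 ++ [c], some iv)

-- trailing 'if cur is not None: merged.append(cur)'
def pvMergeFin (st : List (Int × Int) × Option (Int × Int)) : List (Int × Int) :=
  match st.2 with
  | none => st.1
  | some c => st.1 ++ [c]

def pvMerge (ivs : List (Int × Int)) : List (Int × Int) :=
  pvMergeFin (ivs.foldl pvMergeStep ([], none))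

-- _covered's while loop (hand-rolled bisect_right)
def pvBS (merged : List (Int × Int)) (x : Int) (lo hi : Nat) : Nat :=
  if h : lo < hi then
    let mid := (lo + hi) / 2
    if (merged.getD mid (0, 0)).1 ≤ x then pvBS merged x (mid + 1) hi
    else pvBS merged x lo mid
  else lo
termination_by hi - lo
decreasing_by all_goals omega

def pvCovered (merged : List (Int × Int)) (x : Int) : Bool :=
  let lo := pvBS merged x 0 merged.length
  decide (0 < lo) && decide (x ≤ (merged.getD (lo - 1) (0, 0)).2)

def get_good_tickets_alt (tickets : List (List Int)) (ranges : List (String × List (Int × Int))) : List (List Int) :=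
  let ivs := PySem.List.sorted ((PySem.Dict.ofList ranges).values.flatMap id) (fun iv => iv.1) false
  let merged := pvMerge ivs
  tickets.filter (fun t => t.all (fun x => pvCovered merged x))

-- ===== PRECONDITION & SPEC =====
def Spec_get_good_tickets (tickets : List (List Int)) (ranges : List (String × List (Int × Int))) (out : List (List Int)) : Prop := out = get_good_tickets_alt tickets ranges
instance (tickets : List (List Int)) (ranges : List (String × List (Int × Int))) (out : List (List Int)) : Decidable (Spec_get_good_tickets tickets ranges out) := by unfold Spec_get_good_tickets; infer_instance

-- ===== CLAIM (what is proved, stated in full; the proofs are below) =====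
def Claim_equal_get_good_tickets : Prop := ∀ (tickets : List (List Int)) (ranges : List (String × List (Int × Int))), Dom_get_good_tickets tickets ranges → Spec_get_good_tickets tickets ranges (get_good_tickets tickets ranges)

-- ===== LEMMAS AND PROOFS =====

-- 'x is covered by some interval of l'
def covb (l : List (Int × Int)) (x : Int) : Bool :=
  l.any (fun p => decide (p.1 ≤ x) && decide (x ≤ p.2))

theorem pvInnerA_eq (x : Int) (l : List (Int × Int)) : pvInnerA x l = covb l x := by
  induction l with
  | nil => rfl
  | cons p rest ih =>
    obtain ⟨a, b⟩ := p
    by_cases h : a ≤ x ∧ x ≤ b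
    · simp [pvInnerA, covb, h.1, h.2]
    · have hd : (decide (a ≤ x) && decide (x ≤ b)) = false := by
        rcases not_and_or.mp h with h' | h' <;> simp [h']
      simp [pvInnerA, covb, h, hd, ih]

theorem pvNumInRangesA_eq (x : Int) (vs : List (List (Int × Int))) :
    pvNumInRangesA x vs = covb (vs.flatMap id) x := by
  induction vs with
  | nil => rfl
  | cons v rest ih =>
    simp only [pvNumInRangesA, pvInnerA_eq, ih, List.flatMap_cons, id]
    simp only [covb, List.any_append]
    cases h : v.any (fun p => decide (p.1 ≤ x) && decide (x ≤ p.2)) <;> simp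

theorem pvDiscardA_eq (vals : List (List (Int × Int))) (t : List Int) :
    pvDiscardA vals t = ! t.all (fun x => covb (vals.flatMap id) x) := by
  induction t with
  | nil => rfl
  | cons x rest ih =>
    simp only [pvDiscardA, pvNumInRangesA_eq, ih, List.all_cons]
    cases h : covb (vals.flatMap id) x <;> simp

-- merged-interval chain relation: earlier interval ends before and starts no later
def IvR (p q : Int × Int) : Prop := p.2 < q.1 ∧ p.1 ≤ q.1

def curTest (cur : Option (Int × Int)) (x : Int) : Bool :=
  match cur with
  | none => false
  | some c => decide (c.1 ≤ x) && decide (x ≤ c.2)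

theorem pvMerge_cov (ivs : List (Int × Int)) (hs : ivs.Pairwise (fun p q => p.1 ≤ q.1))
    (acc : List (Int × Int)) (cur : Option (Int × Int))
    (hcur : ∀ c, cur = some c → ∀ iv ∈ ivs, c.1 ≤ iv.1) (x : Int) :
    covb (pvMergeFin (ivs.foldl pvMergeStep (acc, cur))) x =
      (covb acc x || curTest cur x || covb ivs x) := by
  induction ivs generalizing acc cur with
  | nil =>
    cases cur with
    | none => simp [pvMergeFin, covb, curTest]
    | some c => simp [pvMergeFin, covb, curTest, List.any_append]
  | cons iv rest ih =>
    rw [List.pairwise_cons] at hs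
    obtain ⟨hs1, hs2⟩ := hs
    rw [List.foldl_cons]
    cases cur with
    | none =>
      rw [show pvMergeStep (acc, none) iv = (acc, some iv) from rfl]
      rw [ih hs2 acc (some iv) (fun c hc q hq => by injection hc with h'; subst h'; exact hs1 q hq)]
      simp [covb, curTest, Bool.or_assoc]
    | some c =>
      have hc1 : c.1 ≤ iv.1 := hcur c rfl iv (List.mem_cons_self ..)
      by_cases h1 : iv.1 ≤ c.2
      · by_cases h2 : iv.2 > c.2
        · rw [show pvMergeStep (acc, some c) iv = (acc, some (c.1, iv.2)) from by
            simp [pvMergeStep, if_pos h1, if_pos h2]]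
          rw [ih hs2 acc (some (c.1, iv.2)) (fun d hd q hq => by
            injection hd with h'; subst h'; exact le_trans hc1 (hs1 q hq))]
          have himp : (c.1 ≤ x ∧ x ≤ iv.2) ↔ ((c.1 ≤ x ∧ x ≤ c.2) ∨ (iv.1 ≤ x ∧ x ≤ iv.2)) := by
            omega
          apply Bool.eq_iff_iff.mpr
          simp only [covb, curTest, List.any_cons, Bool.or_eq_true, Bool.and_eq_true,
            decide_eq_true_eq]
          tauto
        · rw [show pvMergeStep (acc, some c) iv = (acc, some c) from by
            simp [pvMergeStep, if_pos h1, if_neg h2]]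
          rw [ih hs2 acc (some c) (fun d hd q hq => by
            injection hd with h'; subst h'; exact hcur c rfl q (List.mem_cons_of_mem _ hq))]
          have himp : (iv.1 ≤ x ∧ x ≤ iv.2) → (c.1 ≤ x ∧ x ≤ c.2) := by omega
          apply Bool.eq_iff_iff.mpr
          simp only [covb, curTest, List.any_cons, Bool.or_eq_true, Bool.and_eq_true,
            decide_eq_true_eq]
          tauto
      · rw [show pvMergeStep (acc, some c) iv = (acc ++ [c], some iv) from by
          simp [pvMergeStep, if_neg h1]]
        rw [ih hs2 (acc ++ [c]) (some iv) (fun d hd q hq => by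
          injection hd with h'; subst h'; exact hs1 q hq)]
        apply Bool.eq_iff_iff.mpr
        simp only [covb, curTest, List.any_cons, List.any_append, Bool.or_eq_true,
          Bool.and_eq_true, decide_eq_true_eq, List.any_nil, or_false]
        tauto

theorem pvMerge_chain (ivs : List (Int × Int)) (hs : ivs.Pairwise (fun p q => p.1 ≤ q.1))
    (acc : List (Int × Int)) (cur : Option (Int × Int))
    (h1 : acc.Pairwise IvR)
    (h2 : ∀ p ∈ acc, ∀ c, cur = some c → IvR p c)
    (h3 : ∀ p ∈ acc, ∀ iv ∈ ivs, IvR p iv)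
    (h4 : ∀ c, cur = some c → ∀ iv ∈ ivs, c.1 ≤ iv.1) :
    (pvMergeFin (ivs.foldl pvMergeStep (acc, cur))).Pairwise IvR := by
  induction ivs generalizing acc cur with
  | nil =>
    cases cur with
    | none => exact h1
    | some c =>
      refine List.pairwise_append.mpr ⟨h1, List.pairwise_singleton .., ?_⟩
      intro p hp q hq
      rw [List.mem_singleton] at hq
      subst hq
      exact h2 p hp q rfl
  | cons iv rest ih =>
    rw [List.pairwise_cons] at hs
    obtain ⟨hs1, hs2⟩ := hs
    rw [List.foldl_cons]
    cases cur with
    | none =>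
      rw [show pvMergeStep (acc, none) iv = (acc, some iv) from rfl]
      refine ih hs2 acc (some iv) h1 ?_ ?_ ?_
      · intro p hp d hd; injection hd with h'; subst h'; exact h3 p hp iv (List.mem_cons_self ..)
      · intro p hp q hq; exact h3 p hp q (List.mem_cons_of_mem _ hq)
      · intro d hd q hq; injection hd with h'; subst h'; exact hs1 q hq
    | some c =>
      have hc1 : c.1 ≤ iv.1 := h4 c rfl iv (List.mem_cons_self ..)
      by_cases hb1 : iv.1 ≤ c.2
      · by_cases hb2 : iv.2 > c.2
        · rw [show pvMergeStep (acc, some c) iv = (acc, some (c.1, iv.2)) from by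
            simp [pvMergeStep, if_pos hb1, if_pos hb2]]
          refine ih hs2 acc (some (c.1, iv.2)) h1 ?_ ?_ ?_
          · intro p hp d hd
            injection hd with h'
            subst h'
            exact h2 p hp c rfl
          · intro p hp q hq; exact h3 p hp q (List.mem_cons_of_mem _ hq)
          · intro d hd q hq; injection hd with h'; subst h'; exact le_trans hc1 (hs1 q hq)
        · rw [show pvMergeStep (acc, some c) iv = (acc, some c) from by
            simp [pvMergeStep, if_pos hb1, if_neg hb2]]
          refine ih hs2 acc (some c) h1 ?_ ?_ ?_
          · intro p hp d hd; injection hd with h'; subst h'; exact h2 p hp c rfl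
          · intro p hp q hq; exact h3 p hp q (List.mem_cons_of_mem _ hq)
          · intro d hd q hq; injection hd with h'; subst h'
            exact h4 c rfl q (List.mem_cons_of_mem _ hq)
      · rw [show pvMergeStep (acc, some c) iv = (acc ++ [c], some iv) from by
          simp [pvMergeStep, if_neg hb1]]
        refine ih hs2 (acc ++ [c]) (some iv) ?_ ?_ ?_ ?_
        · refine List.pairwise_append.mpr ⟨h1, List.pairwise_singleton .., ?_⟩
          intro p hp q hq
          rw [List.mem_singleton] at hq
          subst hq
          exact h2 p hp q rfl
        · intro p hp d hd
          injection hd with h'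
          subst h'
          rcases List.mem_append.mp hp with hp' | hp'
          · exact h3 p hp' iv (List.mem_cons_self ..)
          · rw [List.mem_singleton] at hp'
            subst hp'
            exact ⟨by omega, hc1⟩
        · intro p hp q hq
          rcases List.mem_append.mp hp with hp' | hp'
          · exact h3 p hp' q (List.mem_cons_of_mem _ hq)
          · rw [List.mem_singleton] at hp'
            subst hp'
            have := hs1 q hq
            exact ⟨by omega, by omega⟩
        · intro d hd q hq; injection hd with h'; subst h'; exact hs1 q hq

theorem pvBS_spec (merged : List (Int × Int)) (x : Int)
    (hmono : merged.Pairwise (fun p q => p.1 ≤ q.1)) :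
    ∀ lo hi, lo ≤ hi → hi ≤ merged.length →
    (∀ k (hk : k < merged.length), k < lo → merged[k].1 ≤ x) →
    (∀ k (hk : k < merged.length), hi ≤ k → x < merged[k].1) →
    pvBS merged x lo hi ≤ merged.length ∧
    (∀ k (hk : k < merged.length), k < pvBS merged x lo hi → merged[k].1 ≤ x) ∧
    (∀ k (hk : k < merged.length), pvBS merged x lo hi ≤ k → x < merged[k].1) := by
  have hget := List.pairwise_iff_getElem.mp hmono
  have main : ∀ n lo hi, hi - lo = n → lo ≤ hi → hi ≤ merged.length →
      (∀ k (hk : k < merged.length), k < lo → merged[k].1 ≤ x) →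
      (∀ k (hk : k < merged.length), hi ≤ k → x < merged[k].1) →
      pvBS merged x lo hi ≤ merged.length ∧
      (∀ k (hk : k < merged.length), k < pvBS merged x lo hi → merged[k].1 ≤ x) ∧
      (∀ k (hk : k < merged.length), pvBS merged x lo hi ≤ k → x < merged[k].1) := by
    intro n
    induction n using Nat.strong_induction_on with
    | _ n ihn =>
      intro lo hi hn hle hhi hlow hhigh
      by_cases h : lo < hi
      · have hmlt : (lo + hi) / 2 < merged.length := by omega
        rw [pvBS]
        simp only [dif_pos h]
        rw [List.getD_eq_getElem merged (0, 0) hmlt]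
        by_cases hc : merged[(lo + hi) / 2].1 ≤ x
        · rw [if_pos hc]
          refine ihn (hi - ((lo + hi) / 2 + 1)) (by omega) ((lo + hi) / 2 + 1) hi rfl (by omega) hhi ?_ hhigh
          intro k hk hklt
          by_cases hkm : k < (lo + hi) / 2
          · exact le_trans (hget k ((lo + hi) / 2) hk hmlt hkm) hc
          · have : k = (lo + hi) / 2 := by omega
            subst this
            exact hc
        · rw [if_neg hc]
          refine ihn ((lo + hi) / 2 - lo) (by omega) lo ((lo + hi) / 2) rfl (by omega) (by omega) hlow ?_
          intro k hk hkge
          by_cases hkm : (lo + hi) / 2 < k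
          · exact lt_of_lt_of_le (lt_of_not_ge hc) (hget ((lo + hi) / 2) k hmlt hk hkm)
          · have : k = (lo + hi) / 2 := by omega
            subst this
            exact lt_of_not_ge hc
      · rw [pvBS]
        simp only [dif_neg h]
        have heq : lo = hi := by omega
        exact ⟨by omega, fun k hk hkl => hlow k hk hkl, fun k hk hkg => hhigh k hk (by omega)⟩
  intro lo hi hle hhi hlow hhigh
  exact main (hi - lo) lo hi rfl hle hhi hlow hhigh

theorem pvCovered_eq (merged : List (Int × Int)) (hm : merged.Pairwise IvR) (x : Int) :
    pvCovered merged x = covb merged x := by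
  have hmono : merged.Pairwise (fun p q => p.1 ≤ q.1) := hm.imp (fun h => h.2)
  obtain ⟨hr1, hr2, hr3⟩ := pvBS_spec merged x hmono 0 merged.length (Nat.zero_le _)
    (le_refl _) (by intro k hk hkl; omega) (by intro k hk hkg; omega)
  have hchain := List.pairwise_iff_getElem.mp hm
  unfold pvCovered
  apply Bool.eq_iff_iff.mpr
  simp only [Bool.and_eq_true, decide_eq_true_eq, covb, List.any_eq_true, Bool.and_eq_true,
    decide_eq_true_eq]
  constructor
  · rintro ⟨hpos, hle⟩
    have hrlt : pvBS merged x 0 merged.length - 1 < merged.length := by omega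
    rw [List.getD_eq_getElem merged (0, 0) hrlt] at hle
    exact ⟨merged[pvBS merged x 0 merged.length - 1], List.getElem_mem hrlt,
      hr2 _ hrlt (by omega), hle⟩
  · rintro ⟨p, hp, hax, hxb⟩
    obtain ⟨j, hj, hpj⟩ := List.mem_iff_getElem.mp hp
    subst hpj
    have hjr : j < pvBS merged x 0 merged.length := by
      by_contra hcon
      exact absurd (hr3 j hj (by omega)) (by omega)
    refine ⟨by omega, ?_⟩
    have hrlt : pvBS merged x 0 merged.length - 1 < merged.length := by omega
    rw [List.getD_eq_getElem merged (0, 0) hrlt]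
    by_cases hje : j = pvBS merged x 0 merged.length - 1
    · subst hje; exact hxb
    · have hjlt : j < pvBS merged x 0 merged.length - 1 := by omega
      have := (hchain j _ hj hrlt hjlt).1
      have := hr2 _ hrlt (by omega)
      omega

theorem covb_perm {l l' : List (Int × Int)} (h : l.Perm l') (x : Int) :
    covb l x = covb l' x := by
  apply Bool.eq_iff_iff.mpr
  simp only [covb, List.any_eq_true]
  constructor
  · rintro ⟨p, hp, hx⟩; exact ⟨p, h.mem_iff.mp hp, hx⟩
  · rintro ⟨p, hp, hx⟩; exact ⟨p, h.mem_iff.mpr hp, hx⟩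

-- ===== VERDICT (by name: the statement is the Claim_ definition above) =====
theorem get_good_tickets_spec : Claim_equal_get_good_tickets := by
  intro tickets ranges _
  unfold Spec_get_good_tickets get_good_tickets get_good_tickets_alt
  simp only []
  set vals := (PySem.Dict.ofList ranges).values with hvals
  set flat := vals.flatMap id with hflat
  set ivs := PySem.List.sorted flat (fun iv => iv.1) false with hivs
  set merged := pvMerge ivs with hmerged
  have hs : ivs.Pairwise (fun p q => p.1 ≤ q.1) := PySem.List.sorted_pairwise flat (fun iv => iv.1)
  have hchain : merged.Pairwise IvR := by
    rw [hmerged]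
    unfold pvMerge
    exact pvMerge_chain ivs hs [] none (List.Pairwise.nil) (by simp) (by simp)
      (by intro c hc; cases hc)
  have hcov : ∀ y : Int, pvCovered merged y = covb flat y := by
    intro y
    rw [pvCovered_eq merged hchain y]
    have h1 : covb merged y = covb ivs y := by
      rw [hmerged]
      unfold pvMerge
      rw [pvMerge_cov ivs hs [] none (by intro c hc; cases hc) y]
      simp [covb, curTest]
    rw [h1]
    exact covb_perm (PySem.List.sorted_perm flat (fun iv => iv.1) false) y
  rw [PySem.List.foldl_append_if]
  rw [List.nil_append, List.map_id']
  apply List.filter_congr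
  intro t _
  rw [pvDiscardA_eq, Bool.not_not]
  have : (fun x => pvCovered merged x) = (fun x => covb (vals.flatMap id) x) := by
    funext y
    rw [hcov y]
  rw [this]
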